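-- pv_equiv track=rewrite | github.com/cibimo/ArkGachaAnalysisTool | 分析.py | accumulativeGacha
-- ===== SOURCE A (Python) =====
-- def accumulativeGacha(starNum,gachaList):
--     starRecord = []
--     num = 0
--     for i in gachaList:
--         if i[1] == starNum:
--             num += 1
--             starRecord.append(f"{i[2]}[{num}]")
--             num = 0
--         else:
--             num += 1
--     return num, starRecord
-- ===== SOURCE B (Python) =====
-- def _first_match(starNum, rest):
--     """Index and name of the first pull of the wanted rarity, or None."""
--     for j, item in enumerate(rest):
--         if item[1] == starNum:
--             return j, item[2]
--     return None
--
-- def accumulativeGacha(starNum, gachaList):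
--     starRecord = []
--     rest = gachaList
--     while True:
--         hit = _first_match(starNum, rest)
--         if hit is None:
--             return len(rest), starRecord
--         j, name = hit
--         starRecord.append(f"{name}[{j + 1}]")
--         rest = rest[j + 1:]
-- ===== Notes on version B (the rewrite author's own statement) =====
-- stated objective: alternative
-- what changed: B replaces A's single element-wise pass carrying a reset counter with an outer loop over matches: it repeatedly finds the first pull of the wanted rarity in the remaining slice, records name[index+1], and slices past it; the leftover slice length is the trailing num.
import Mathlib
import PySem

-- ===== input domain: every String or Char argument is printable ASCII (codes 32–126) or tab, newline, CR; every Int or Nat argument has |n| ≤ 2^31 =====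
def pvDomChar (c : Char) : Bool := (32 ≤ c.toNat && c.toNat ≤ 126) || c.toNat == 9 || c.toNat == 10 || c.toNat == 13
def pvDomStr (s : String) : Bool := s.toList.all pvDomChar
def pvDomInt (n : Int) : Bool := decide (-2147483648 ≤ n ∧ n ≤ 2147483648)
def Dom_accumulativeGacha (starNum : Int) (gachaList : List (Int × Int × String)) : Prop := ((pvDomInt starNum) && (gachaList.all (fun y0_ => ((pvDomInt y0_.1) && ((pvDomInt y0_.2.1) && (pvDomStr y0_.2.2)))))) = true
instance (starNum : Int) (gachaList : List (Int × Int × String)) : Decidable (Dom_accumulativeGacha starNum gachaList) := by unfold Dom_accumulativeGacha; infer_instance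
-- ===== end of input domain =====

-- B splits the list at each pull of the wanted rarity (outer loop over matches, inner
-- first-match scan, slicing) instead of A's single element-wise pass with a reset
-- counter; same O(n) cost (objective: alternative).

-- ===== PORT A =====
def accumulativeGacha (starNum : Int) (gachaList : List (Int × Int × String)) : Int × List String :=
  let s := gachaList.foldl
    (fun (acc : Int × List String) i =>
      if i.2.1 == starNum then
        (0, acc.2 ++ [i.2.2 ++ "[" ++ PySem.Int.toStr (acc.1 + 1) ++ "]"])
      else
        (acc.1 + 1, acc.2))
    (0, [])
  (s.1, s.2)

-- ===== PORT B =====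
-- _first_match: enumerate scan for the first item of the wanted rarity
def firstMatch (starNum : Int) : List (Int × Int × String) → Nat → Option (Nat × String)
  | [], _ => none
  | i :: t, j => if i.2.1 == starNum then some (j, i.2.2) else firstMatch starNum t (j + 1)

-- needed by the port's termination proof (cited in altLoop's decreasing_by)
theorem firstMatch_lt {starNum : Int} : ∀ (l : List (Int × Int × String)) (j0 j : Nat) (s : String),
    firstMatch starNum l j0 = some (j, s) → j0 ≤ j ∧ j - j0 < l.length := by
  intro l
  induction l with
  | nil => intro j0 j s h; simp [firstMatch] at h
  | cons a t ih =>
    intro j0 j s h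
    simp only [firstMatch] at h
    split at h
    · cases h; simp
    · have := ih (j0 + 1) j s h; simp; omega

-- the while-loop of B
def altLoop (starNum : Int) (rest : List (Int × Int × String)) (record : List String) : Int × List String :=
  match h : firstMatch starNum rest 0 with
  | none => ((rest.length : Int), record)
  | some (j, name) =>
      altLoop starNum (rest.drop (j + 1)) (record ++ [name ++ "[" ++ PySem.Int.toStr ((j : Int) + 1) ++ "]"])
termination_by rest.length
decreasing_by
  have := firstMatch_lt rest 0 j name h
  simp only [List.length_drop]
  omega

def accumulativeGacha_alt (starNum : Int) (gachaList : List (Int × Int × String)) : Int × List String :=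
  altLoop starNum gachaList []

-- ===== PRECONDITION & SPEC =====
def Spec_accumulativeGacha (starNum : Int) (gachaList : List (Int × Int × String)) (out : Int × List String) : Prop := out = accumulativeGacha_alt starNum gachaList
instance (starNum : Int) (gachaList : List (Int × Int × String)) (out : Int × List String) : Decidable (Spec_accumulativeGacha starNum gachaList out) := by unfold Spec_accumulativeGacha; infer_instance

-- ===== CLAIM (what is proved, stated in full; the proofs are below) =====
def Claim_equal_accumulativeGacha : Prop := ∀ (starNum : Int) (gachaList : List (Int × Int × String)), Dom_accumulativeGacha starNum gachaList → Spec_accumulativeGacha starNum gachaList (accumulativeGacha starNum gachaList)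

-- ===== LEMMAS AND PROOFS =====

-- A's loop body as a named step function (definitionally the lambda in accumulativeGacha)
def stepA (starNum : Int) (acc : Int × List String) (i : Int × Int × String) : Int × List String :=
  if i.2.1 == starNum then
    (0, acc.2 ++ [i.2.2 ++ "[" ++ PySem.Int.toStr (acc.1 + 1) ++ "]"])
  else
    (acc.1 + 1, acc.2)

-- the enumerate index is only an offset
theorem firstMatch_shift {starNum : Int} : ∀ (l : List (Int × Int × String)) (j0 : Nat),
    firstMatch starNum l j0 = (firstMatch starNum l 0).map (fun p => (p.1 + j0, p.2)) := by
  intro l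
  induction l with
  | nil => intro j0; simp [firstMatch]
  | cons a t ih =>
    intro j0
    simp only [firstMatch]
    split
    · simp
    · rw [ih (j0 + 1), ih 1]
      cases firstMatch starNum t 0 <;> simp <;> omega

-- if no element matches, A's fold just counts the elements
theorem foldA_none {starNum : Int} : ∀ (l : List (Int × Int × String)) (c : Int) (r : List String),
    firstMatch starNum l 0 = none →
    l.foldl (stepA starNum) (c, r) = (c + l.length, r) := by
  intro l
  induction l with
  | nil => intro c r _; simp
  | cons a t ih =>
    intro c r h
    simp only [firstMatch] at h
    split at h
    · simp at h
    · rw [firstMatch_shift t 1, Option.map_eq_none_iff] at h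
      rename_i hm
      rw [List.foldl_cons]
      have hs : stepA starNum (c, r) a = (c + 1, r) := by
        simp only [stepA]; rw [if_neg hm]
      rw [hs, ih (c + 1) r h]
      refine Prod.ext ?_ rfl
      simp; ring
-- past the first match, A's fold restarts its counter at 0 on the remaining slice
theorem foldA_some {starNum : Int} : ∀ (l : List (Int × Int × String)) (j : Nat) (s : String)
    (c : Int) (r : List String),
    firstMatch starNum l 0 = some (j, s) →
    l.foldl (stepA starNum) (c, r) =
      (l.drop (j + 1)).foldl (stepA starNum) (0, r ++ [s ++ "[" ++ PySem.Int.toStr (c + j + 1) ++ "]"]) := by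
  intro l
  induction l with
  | nil => intro j s c r h; simp [firstMatch] at h
  | cons a t ih =>
    intro j s c r h
    simp only [firstMatch] at h
    split at h
    · rename_i hm
      cases h
      rw [List.foldl_cons]
      have hs : stepA starNum (c, r) a = (0, r ++ [a.2.2 ++ "[" ++ PySem.Int.toStr (c + 1) ++ "]"]) := by
        simp only [stepA]; rw [if_pos hm]
      rw [hs]
      simp
    · rename_i hm
      rw [firstMatch_shift t 1] at h
      rcases Option.map_eq_some_iff.mp h with ⟨⟨j2, s2⟩, hj', heq⟩
      simp only [Prod.mk.injEq] at heq
      obtain ⟨hj, hs2⟩ := heq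
      subst hs2
      subst hj
      rw [List.foldl_cons]
      have hcs : stepA starNum (c, r) a = (c + 1, r) := by
        simp only [stepA]; rw [if_neg hm]
      rw [hcs, ih j2 _ (c + 1) r hj']
      have hdrop : (a :: t).drop (j2 + 1 + 1) = t.drop (j2 + 1) := rfl
      rw [hdrop]
      have hc2 : c + 1 + (j2 : Int) + 1 = c + ((j2 + 1 : Nat) : Int) + 1 := by push_cast; ring
      rw [hc2]

-- A's fold (counter 0) equals B's while-loop, for any accumulated record
theorem foldA_eq_altLoop (starNum : Int) : ∀ (l : List (Int × Int × String)) (r : List String),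
    l.foldl (stepA starNum) (0, r) = altLoop starNum l r := by
  intro l r
  fun_induction altLoop starNum l r with
  | case1 l r h =>
    rw [foldA_none l 0 r h]
    simp
  | case2 l r j name h ih =>
    rw [foldA_some l j name 0 r h]
    simpa using ih

-- ===== VERDICT (by name: the statement is the Claim_ definition above) =====
theorem accumulativeGacha_spec : Claim_equal_accumulativeGacha := by
  intro starNum gachaList _
  unfold Spec_accumulativeGacha accumulativeGacha accumulativeGacha_alt
  rw [← foldA_eq_altLoop starNum gachaList []]
  rfl
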